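-- pv_equiv track=rewrite | github.com/rafakimanja/Desafio-Django-com-WebScraping | scraping/refatora_string.py | extrair_valores_itens
-- ===== SOURCE A (Python) =====
-- def extrair_valores_itens(lista, objedo_bd):
--     lista_itens = []
--     controle = 0
--     for i, item in enumerate(lista):
--         dados_itens = {}
--         match controle:
--             case 0:
--                 dados_itens['numero'] = item
--                 controle += 1
--             case 1:
--                 dados_itens['descricao'] = item
--                 controle += 1
--             case 2:
--                 dados_itens['quantidade'] = item
--                 controle += 1
--             case 3:
--                 dados_itens['valor_unitario'] = item
--                 controle += 1
--             case 4:
--                 dados_itens['valor'] = item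
--                 controle = 0
--
--         lista_itens.append(dados_itens.copy())
--
--     return lista_itens
-- ===== SOURCE B (Python) =====
-- KEYS = ['numero', 'descricao', 'quantidade', 'valor_unitario', 'valor']
--
-- def extrair_valores_itens(lista, objedo_bd):
--     # chunking: repeatedly pull the next (up to) 5 items off an iterator and
--     # zip them against KEYS (zip truncates on a short final chunk)
--     it = iter(lista)
--     out = []
--     while True:
--         chunk = [x for _, x in zip(range(5), it)]
--         if not chunk:
--             return out
--         out.extend({k: v} for k, v in zip(KEYS, chunk))
-- ===== Notes on version B (the rewrite author's own statement) =====
-- stated objective: alternative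
-- what changed: Replaces A's single-pass counter state machine (match on a running controle) with a chunking loop that repeatedly pulls the next five items off an iterator and zips them against a fixed keys list, relying on zip's truncation for a short final chunk.
import Mathlib
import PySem

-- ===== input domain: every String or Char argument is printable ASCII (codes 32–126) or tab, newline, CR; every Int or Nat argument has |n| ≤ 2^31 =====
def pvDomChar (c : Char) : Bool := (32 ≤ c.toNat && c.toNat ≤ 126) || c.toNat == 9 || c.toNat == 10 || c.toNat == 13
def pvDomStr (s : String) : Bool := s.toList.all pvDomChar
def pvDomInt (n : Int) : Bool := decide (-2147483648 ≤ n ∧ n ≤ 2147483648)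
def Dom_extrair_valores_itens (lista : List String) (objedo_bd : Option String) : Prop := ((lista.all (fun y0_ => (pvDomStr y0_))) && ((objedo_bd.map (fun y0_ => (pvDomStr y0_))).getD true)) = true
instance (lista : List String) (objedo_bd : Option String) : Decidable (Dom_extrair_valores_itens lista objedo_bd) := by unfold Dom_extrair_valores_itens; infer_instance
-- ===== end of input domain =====

-- Header: B replaces A's running-counter match state machine with a chunking loop that zips each run of five items against a fixed keys list (objective: alternative); return values proved equal on Dom.
-- ===== PORT A =====
-- step of A's loop body: the match on controle, appending the one-key dict copy
def pvStepA (st : List (List (String × String)) × Int) (item : String) :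
    List (List (String × String)) × Int :=
  let dados : PySem.Dict String String := PySem.Dict.empty
  if st.2 = 0 then (st.1 ++ [(PySem.Dict.insert dados "numero" item).items], st.2 + 1)
  else if st.2 = 1 then (st.1 ++ [(PySem.Dict.insert dados "descricao" item).items], st.2 + 1)
  else if st.2 = 2 then (st.1 ++ [(PySem.Dict.insert dados "quantidade" item).items], st.2 + 1)
  else if st.2 = 3 then (st.1 ++ [(PySem.Dict.insert dados "valor_unitario" item).items], st.2 + 1)
  else if st.2 = 4 then (st.1 ++ [(PySem.Dict.insert dados "valor" item).items], 0)
  else (st.1 ++ [dados.items], st.2)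

def extrair_valores_itens (lista : List String) (objedo_bd : Option String) :
    List (List (String × String)) :=
  (lista.foldl pvStepA ([], 0)).1

-- ===== PORT B =====
def pvKeys : List String := ["numero", "descricao", "quantidade", "valor_unitario", "valor"]

-- Source B's while loop over the iterator, transcribed as recursion on the remaining
-- list: the chunk is the next (up to) 5 items, the iterator state is the rest
def extrair_valores_itens_alt (lista : List String) (objedo_bd : Option String) :
    List (List (String × String)) :=
  match lista with
  | [] => []
  | x :: xs =>
    ((pvKeys.zip ((x :: xs).take 5)).map (fun p => [(p.1, p.2)]))
      ++ extrair_valores_itens_alt ((x :: xs).drop 5) objedo_bd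
termination_by lista.length
decreasing_by
  simp

-- ===== PRECONDITION & SPEC =====
def Spec_extrair_valores_itens (lista : List String) (objedo_bd : Option String) (out : List (List (String × String))) : Prop := out = extrair_valores_itens_alt lista objedo_bd
instance (lista : List String) (objedo_bd : Option String) (out : List (List (String × String))) : Decidable (Spec_extrair_valores_itens lista objedo_bd out) := by unfold Spec_extrair_valores_itens; infer_instance

-- ===== CLAIM (what is proved, stated in full; the proofs are below) =====
def Claim_equal_extrair_valores_itens : Prop := ∀ (lista : List String) (objedo_bd : Option String), Dom_extrair_valores_itens lista objedo_bd → Spec_extrair_valores_itens lista objedo_bd (extrair_valores_itens lista objedo_bd)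

-- ===== LEMMAS AND PROOFS =====
-- the per-element value A's loop appends, expressed via the index modulo 5
def pvF (p : Int × String) : List (String × String) :=
  [(PySem.List.pyGetD pvKeys (PySem.Int.mod p.1 5) "", p.2)]

theorem pvA_loop (lista : List String) (s : Nat)
    (acc : List (List (String × String))) :
    (lista.foldl pvStepA (acc, ((s % 5 : Nat) : Int))).1
      = acc ++ (PySem.List.enumerate lista (s : Int)).map pvF := by
  induction lista generalizing s acc with
  | nil => simp
  | cons x xs ih =>
    have hk : (PySem.Int.mod ((s : Nat) : Int) 5) = ((s % 5 : Nat) : Int) := by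
      simp [PySem.Int.mod, Int.fmod_eq_emod]
    have h5 : s % 5 = 0 ∨ s % 5 = 1 ∨ s % 5 = 2 ∨ s % 5 = 3 ∨ s % 5 = 4 := by omega
    have hstep : pvStepA (acc, ((s % 5 : Nat) : Int)) x
        = (acc ++ [pvF (((s:Nat):Int), x)], (((s + 1) % 5 : Nat) : Int)) := by
      rcases h5 with h | h | h | h | h <;>
        · rw [pvF, hk, h]
          have h1 : (s + 1) % 5 = (s % 5 + 1) % 5 := by omega
          rw [h1, h]
          simp [pvStepA, pvKeys, PySem.List.pyGetD, PySem.Dict.insert, PySem.Dict.empty]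
    rw [PySem.List.enumerate_cons, List.foldl_cons, hstep]
    have := ih (s := s + 1) (acc := acc ++ [pvF (((s:Nat):Int), x)])
    rw [this]
    simp

-- pvF depends on the index only modulo 5, so shifting enumerate's start by 5 changes nothing
theorem pvF_shift (xs : List String) (s : Int) :
    (PySem.List.enumerate xs (s + 5)).map pvF = (PySem.List.enumerate xs s).map pvF := by
  induction xs generalizing s with
  | nil => simp
  | cons x xs ih =>
    rw [PySem.List.enumerate_cons, PySem.List.enumerate_cons, List.map_cons, List.map_cons]
    have harg : (s + 5 + 1) = (s + 1) + 5 := by ring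
    rw [harg, ih (s + 1)]
    simp [pvF, PySem.Int.mod, Int.fmod_eq_emod]

theorem alt_nil (o : Option String) : extrair_valores_itens_alt [] o = [] := by
  rw [extrair_valores_itens_alt.eq_def]

theorem alt_cons (x : String) (xs : List String) (o : Option String) :
    extrair_valores_itens_alt (x :: xs) o
      = ((pvKeys.zip ((x :: xs).take 5)).map (fun p => [(p.1, p.2)]))
        ++ extrair_valores_itens_alt ((x :: xs).drop 5) o := by
  rw [extrair_valores_itens_alt.eq_def]

theorem pvF_eq_alt (n : Nat) : ∀ (lista : List String) (o : Option String),
    lista.length ≤ n →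
    (PySem.List.enumerate lista 0).map pvF = extrair_valores_itens_alt lista o := by
  induction n with
  | zero =>
    intro lista o h
    have : lista = [] := List.eq_nil_of_length_eq_zero (by omega)
    subst this; simp [alt_nil]
  | succ n ih =>
    intro lista o h
    match lista with
    | [] => simp [alt_nil]
    | [a] =>
      rw [alt_cons]
      simp [alt_nil, pvKeys, PySem.List.enumerate_cons, pvF, PySem.List.pyGetD, PySem.Int.mod]
    | [a, b] =>
      rw [alt_cons]
      simp [alt_nil, pvKeys, PySem.List.enumerate_cons, pvF, PySem.List.pyGetD, PySem.Int.mod]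
    | [a, b, c] =>
      rw [alt_cons]
      simp [alt_nil, pvKeys, PySem.List.enumerate_cons, pvF, PySem.List.pyGetD, PySem.Int.mod]
    | [a, b, c, d] =>
      rw [alt_cons]
      simp [alt_nil, pvKeys, PySem.List.enumerate_cons, pvF, PySem.List.pyGetD, PySem.Int.mod]
    | a :: b :: c :: d :: e :: rest =>
      have hrest : rest.length ≤ n := by simp at h; omega
      have hih := ih rest o hrest
      have hshift : (PySem.List.enumerate rest (0 + 5)).map pvF
          = (PySem.List.enumerate rest 0).map pvF := pvF_shift rest 0
      norm_num at hshift
      rw [alt_cons]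
      simp only [PySem.List.enumerate_cons, List.map_cons]
      norm_num
      rw [hshift, hih]
      simp [pvF, pvKeys, PySem.List.pyGetD, PySem.Int.mod]

-- ===== VERDICT (by name: the statement is the Claim_ definition above) =====
theorem extrair_valores_itens_spec : Claim_equal_extrair_valores_itens := by
  intro lista objedo_bd _
  unfold Spec_extrair_valores_itens extrair_valores_itens
  have hA := pvA_loop lista 0 []
  simp only [Nat.zero_mod, Nat.cast_zero, List.nil_append] at hA
  rw [hA]
  exact pvF_eq_alt lista.length lista objedo_bd le_rfl
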